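-- pv_equiv track=rewrite | github.com/scolicodes/Good-Habit-Dojo | GoodHabitDojo.py | getDaysUntilNextPromotion
-- ===== SOURCE A (Python) =====
-- beltMilestones = {'White': 0, 'Yellow': 10, 'Orange': 20, 'Green': 30,
--                   'Purple': 40, 'Blue': 50, 'Brown': 60, 'Red': 70, 'Pink': 80, 'Black': 90}
--
-- beltRGBs = {'White': [255, 255, 255], 'Yellow': [255, 255, 0], 'Orange': [255, 140, 0], 'Green': [0, 128, 0],
--             'Purple': [186, 85, 211], 'Blue': [0, 0, 255], 'Brown': [139, 69, 19], 'Red': [255, 0, 0],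
--             'Pink': [255, 192, 203], 'Black': [0, 0, 0]}
--
-- RESET_COLOR_FORMAT = '\033[39m'
--
-- def colored(r, g, b, text):
--     return "\033[38;2;{};{};{}m{} \033[38;2;255;255;255m".format(r, g, b, text)
--
-- def getDaysUntilNextPromotion(daysCompleted):
--     daysUntilPromo = 0
--     nextBeltColor = None
--
--     if daysCompleted >= 90:
--         return "Congratulations! You have completed your journey!\n"
--     else:
--         for beltColor in beltMilestones:
--             if daysCompleted < beltMilestones[beltColor]:
--                 nextBeltColor = beltColor
--                 break
--         if daysCompleted % 10 == 0:
--             daysUntilPromo = 10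
--         else:
--             while daysCompleted % 10 != 0:
--                 daysCompleted += 1
--                 daysUntilPromo += 1
--
--         nextBeltColor = colored(beltRGBs[nextBeltColor][0], beltRGBs[nextBeltColor][1], beltRGBs[nextBeltColor][2],
--                                 nextBeltColor)
--         if daysUntilPromo == 1:
--             return str(daysUntilPromo) + ' more day until you get promoted to ' + nextBeltColor + RESET_COLOR_FORMAT + \
--                    'belt!\n'
--         else:
--             return str(daysUntilPromo) + ' more days until you get promoted to ' + nextBeltColor + RESET_COLOR_FORMAT + \
--                    'belt!\n'
-- ===== SOURCE B (Python) =====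
-- BELTS = [('White', (255, 255, 255)), ('Yellow', (255, 255, 0)), ('Orange', (255, 140, 0)),
--          ('Green', (0, 128, 0)), ('Purple', (186, 85, 211)), ('Blue', (0, 0, 255)),
--          ('Brown', (139, 69, 19)), ('Red', (255, 0, 0)), ('Pink', (255, 192, 203)),
--          ('Black', (0, 0, 0))]
--
--
-- def getDaysUntilNextPromotion(daysCompleted):
--     if daysCompleted >= 90:
--         return "Congratulations! You have completed your journey!\n"
--     idx = daysCompleted // 10 + 1 if daysCompleted >= 0 else 0
--     name, (r, g, b) = BELTS[idx]
--     daysUntilPromo = 10 - daysCompleted % 10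
--     unit = 'day' if daysUntilPromo == 1 else 'days'
--     return "{} more {} until you get promoted to \033[38;2;{};{};{}m{} \033[38;2;255;255;255m\033[39mbelt!\n".format(
--         daysUntilPromo, unit, r, g, b, name)
-- ===== Notes on version B (the rewrite author's own statement) =====
-- stated objective: simpler
-- what changed: Replaces the dict scan for the next belt and the counting while-loop with closed-form arithmetic: a direct index into an ordered belt table and a remainder computation for the days until promotion.
import Mathlib
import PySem

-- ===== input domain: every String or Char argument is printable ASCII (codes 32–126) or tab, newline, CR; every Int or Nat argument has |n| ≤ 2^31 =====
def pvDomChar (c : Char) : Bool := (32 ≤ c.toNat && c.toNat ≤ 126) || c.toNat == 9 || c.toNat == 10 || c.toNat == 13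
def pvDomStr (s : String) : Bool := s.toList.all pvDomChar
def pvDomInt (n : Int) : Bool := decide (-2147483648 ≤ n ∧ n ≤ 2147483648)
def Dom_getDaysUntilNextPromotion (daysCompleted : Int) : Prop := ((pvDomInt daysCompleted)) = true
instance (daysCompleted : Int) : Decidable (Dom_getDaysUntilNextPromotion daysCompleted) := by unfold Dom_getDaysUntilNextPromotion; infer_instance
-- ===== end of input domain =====

-- B replaces A's dict scan and counting while-loop by closed-form arithmetic (belt index d//10+1, promo = 10 - d%10); objective: simpler.

-- ===== PORT A =====
def pvBeltMilestones : List (String × Int) :=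
  [("White", 0), ("Yellow", 10), ("Orange", 20), ("Green", 30), ("Purple", 40),
   ("Blue", 50), ("Brown", 60), ("Red", 70), ("Pink", 80), ("Black", 90)]

def pvBeltRGBs : PySem.Dict String (List Int) :=
  PySem.Dict.ofList
    [("White", [255, 255, 255]), ("Yellow", [255, 255, 0]), ("Orange", [255, 140, 0]),
     ("Green", [0, 128, 0]), ("Purple", [186, 85, 211]), ("Blue", [0, 0, 255]),
     ("Brown", [139, 69, 19]), ("Red", [255, 0, 0]), ("Pink", [255, 192, 203]),
     ("Black", [0, 0, 0])]

def pvResetColorFormat : String := "\x1b[39m"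

-- colored(r, g, b, text) = "\033[38;2;{};{};{}m{} \033[38;2;255;255;255m".format(r, g, b, text)
def pvColored (r g b : Int) (text : String) : String :=
  "\x1b[38;2;" ++ PySem.Int.toStr r ++ ";" ++ PySem.Int.toStr g ++ ";" ++ PySem.Int.toStr b
    ++ "m" ++ text ++ " \x1b[38;2;255;255;255m"

-- the 'for beltColor in beltMilestones: if daysCompleted < milestone: … break' scan
def pvScanBelt (d : Int) : List (String × Int) → Option String
  | [] => none
  | (b, m) :: rest => if d < m then some b else pvScanBelt d rest

-- the 'while daysCompleted % 10 != 0: daysCompleted += 1; daysUntilPromo += 1' loop;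
-- the fuel argument (10 suffices: d % 10 ∈ [0,10)) only makes the same computation total
def pvPromoLoop : Nat → Int → Int → Int × Int
  | 0, d, p => (d, p)
  | fuel + 1, d, p =>
    if PySem.Int.mod d 10 ≠ 0 then pvPromoLoop fuel (d + 1) (p + 1) else (d, p)

def getDaysUntilNextPromotion (daysCompleted : Int) : String :=
  if daysCompleted ≥ 90 then "Congratulations! You have completed your journey!\n"
  else
    let nextBeltColor := pvScanBelt daysCompleted pvBeltMilestones
    let daysUntilPromo : Int :=
      if PySem.Int.mod daysCompleted 10 = 0 then 10
      else (pvPromoLoop 10 daysCompleted 0).2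
    match nextBeltColor with
    | none => ""   -- unreachable: for daysCompleted < 90 the scan always finds a belt
    | some belt =>
      let rgb := (pvBeltRGBs.get? belt).getD []
      let colored := pvColored ((PySem.List.pyGet? rgb 0).getD 0) ((PySem.List.pyGet? rgb 1).getD 0)
                       ((PySem.List.pyGet? rgb 2).getD 0) belt
      if daysUntilPromo = 1 then
        PySem.Int.toStr daysUntilPromo ++ " more day until you get promoted to "
          ++ colored ++ pvResetColorFormat ++ "belt!\n"
      else
        PySem.Int.toStr daysUntilPromo ++ " more days until you get promoted to "
          ++ colored ++ pvResetColorFormat ++ "belt!\n"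

-- ===== PORT B =====
def pvBelts : List (String × (Int × Int × Int)) :=
  [("White", (255, 255, 255)), ("Yellow", (255, 255, 0)), ("Orange", (255, 140, 0)),
   ("Green", (0, 128, 0)), ("Purple", (186, 85, 211)), ("Blue", (0, 0, 255)),
   ("Brown", (139, 69, 19)), ("Red", (255, 0, 0)), ("Pink", (255, 192, 203)),
   ("Black", (0, 0, 0))]

def getDaysUntilNextPromotion_alt (daysCompleted : Int) : String :=
  if daysCompleted ≥ 90 then "Congratulations! You have completed your journey!\n"
  else
    let idx : Int := if daysCompleted ≥ 0 then PySem.Int.floordiv daysCompleted 10 + 1 else 0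
    let (name, r, g, b) := (PySem.List.pyGet? pvBelts idx).getD ("White", (255, 255, 255))
    let daysUntilPromo : Int := 10 - PySem.Int.mod daysCompleted 10
    let unit := if daysUntilPromo = 1 then "day" else "days"
    PySem.Int.toStr daysUntilPromo ++ " more " ++ unit
      ++ " until you get promoted to \x1b[38;2;" ++ PySem.Int.toStr r ++ ";"
      ++ PySem.Int.toStr g ++ ";" ++ PySem.Int.toStr b ++ "m" ++ name
      ++ " \x1b[38;2;255;255;255m\x1b[39mbelt!\n"

-- ===== PRECONDITION & SPEC =====
def Spec_getDaysUntilNextPromotion (daysCompleted : Int) (out : String) : Prop := out = getDaysUntilNextPromotion_alt daysCompleted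
instance (daysCompleted : Int) (out : String) : Decidable (Spec_getDaysUntilNextPromotion daysCompleted out) := by unfold Spec_getDaysUntilNextPromotion; infer_instance

-- ===== CLAIM (what is proved, stated in full; the proofs are below) =====
def Claim_equal_getDaysUntilNextPromotion : Prop := ∀ (daysCompleted : Int), Dom_getDaysUntilNextPromotion daysCompleted → Spec_getDaysUntilNextPromotion daysCompleted (getDaysUntilNextPromotion daysCompleted)

-- ===== LEMMAS AND PROOFS =====

-- the while-loop adds exactly 10 - d % 10 to the counter when d % 10 ≠ 0
theorem pvPromoLoop_snd (fuel : Nat) (d p : Int) (hb : (10 - d % 10).toNat ≤ fuel)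
    (hm : 0 < d % 10) : (pvPromoLoop fuel d p).2 = p + (10 - d % 10) := by
  induction fuel generalizing d p with
  | zero => omega
  | succ fuel ih =>
    have hmod : PySem.Int.mod d 10 = d % 10 := PySem.Int.mod_eq_emod_of_pos (by norm_num)
    rw [pvPromoLoop, hmod, if_pos (by omega)]
    by_cases h0 : (d + 1) % 10 = 0
    · have h9 : d % 10 = 9 := by omega
      have hmod1 : PySem.Int.mod (d + 1) 10 = (d + 1) % 10 :=
        PySem.Int.mod_eq_emod_of_pos (by norm_num)
      cases fuel with
      | zero => simp [pvPromoLoop, h9]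
      | succ f => rw [pvPromoLoop, hmod1, if_neg (by omega)]; simp [h9]
    · rw [ih (d + 1) (p + 1) (by omega) (by omega)]; omega

set_option maxHeartbeats 2000000 in
theorem getDaysUntilNextPromotion_eq (d : Int) :
    getDaysUntilNextPromotion d = getDaysUntilNextPromotion_alt d := by
  by_cases h90 : d ≥ 90
  · simp [getDaysUntilNextPromotion, getDaysUntilNextPromotion_alt, h90]
  by_cases hneg : d < 0
  · have hge : ¬ d ≥ 0 := by omega
    by_cases hm0 : d % 10 = 0
    · simp [getDaysUntilNextPromotion, getDaysUntilNextPromotion_alt, pvScanBelt,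
        pvBeltMilestones, hm0, hneg, hge, h90]
      decide
    · have hloop : (pvPromoLoop 10 d 0).2 = 0 + (10 - d % 10) :=
        pvPromoLoop_snd 10 d 0 (by omega) (by omega)
      obtain ⟨m, hm1, hm9, hmd⟩ : ∃ m, 1 ≤ m ∧ m ≤ 9 ∧ d % 10 = m :=
        ⟨d % 10, by omega, by omega, rfl⟩
      rw [hmd] at hloop
      interval_cases m <;>
        · simp [getDaysUntilNextPromotion, getDaysUntilNextPromotion_alt, pvScanBelt,
            pvBeltMilestones, hmd, hloop, hneg, hge, h90]
          decide
  · obtain ⟨q, m, hq0, hq9, hm0, hm10, rfl⟩ :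
        ∃ q m, 0 ≤ q ∧ q < 9 ∧ 0 ≤ m ∧ m < 10 ∧ d = 10 * q + m :=
      ⟨d / 10, d % 10, by omega, by omega, by omega, by omega, by omega⟩
    interval_cases q <;> interval_cases m <;> decide

-- ===== VERDICT (by name: the statement is the Claim_ definition above) =====
theorem getDaysUntilNextPromotion_spec : Claim_equal_getDaysUntilNextPromotion := by
  intro d _
  unfold Spec_getDaysUntilNextPromotion
  exact getDaysUntilNextPromotion_eq d
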